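-- pv_equiv track=rewrite | github.com/Haaza22/cards | Hearts_all.py | win_order
-- ===== SOURCE A (Python) =====
-- def win_order(points):
--     # returns an array with the placment od 1st 2nd and so on in the index of the behaviour that got that place
--
--     # count how many other entries are higher or equal than item. then minue form 5
--     positions = []
--     for i in range(0, 4):
--         more = 0
--         for e in range(0, 4):
--             if points[e] >= points[i]:
--                 more = more + 1
--         positions.append(5 - more)
--
--     return positions
-- ===== SOURCE B (Python) =====
-- import bisect
--
--
-- def win_order(points):
--     # Rank each of the first four scores: 1 + number of strictly smaller
--     # entries, found by one sort plus a binary search per entry.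
--     vals = [points[i] for i in range(4)]
--     sorted_vals = sorted(vals)
--     return [1 + bisect.bisect_left(sorted_vals, v) for v in vals]
-- ===== Notes on version B (the rewrite author's own statement) =====
-- stated objective: idiomatic
-- what changed: Replaced the nested count-of-greater-or-equal rescans with one sort of the four scores plus a bisect_left binary search per score (1 + number of strictly smaller entries).
import Mathlib
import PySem

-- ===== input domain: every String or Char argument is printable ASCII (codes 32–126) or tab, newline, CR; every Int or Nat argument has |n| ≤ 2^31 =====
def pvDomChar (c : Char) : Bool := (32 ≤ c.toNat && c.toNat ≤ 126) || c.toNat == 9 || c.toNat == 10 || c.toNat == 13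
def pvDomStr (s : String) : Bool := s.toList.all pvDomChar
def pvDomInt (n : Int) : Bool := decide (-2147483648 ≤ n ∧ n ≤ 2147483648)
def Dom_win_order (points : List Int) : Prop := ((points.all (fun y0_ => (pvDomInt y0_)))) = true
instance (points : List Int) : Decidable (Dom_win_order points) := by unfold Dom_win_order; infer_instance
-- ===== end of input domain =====

-- B replaces A's nested count-of-≥ rescans by one sort of the four scores plus a
-- bisect_left lookup per score (rank = 1 + number of strictly smaller entries); idiomatic, not faster.


-- ===== PORT A =====
-- literal port: for i in range(4): count e in range(4) with points[e] >= points[i]; append 5 - more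
def win_order (points : List Int) : List Int :=
  (PySem.List.pyRange 0 4 1).foldl (fun positions i =>
    let more : Int := (PySem.List.pyRange 0 4 1).foldl (fun m e =>
      if PySem.List.pyGetD points e 0 ≥ PySem.List.pyGetD points i 0 then m + 1 else m) 0
    positions ++ [5 - more]) []

-- ===== PORT B =====
-- literal port of Source B: vals = first four entries, sorted_vals = sorted(vals),
-- result = [1 + bisect.bisect_left(sorted_vals, v) for v in vals]
def win_order_alt (points : List Int) : List Int :=
  let vals := (PySem.List.pyRange 0 4 1).map (fun i => PySem.List.pyGetD points i 0)
  let sortedVals := PySem.List.sorted vals (fun x => x) false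
  vals.map (fun v => 1 + (PySem.List.bisectLeft sortedVals v : Int))

-- ===== PRECONDITION & SPEC =====
-- both programs index points[0..3] and raise IndexError on shorter lists
def Pre_win_order (points : List Int) : Prop := 4 ≤ points.length
instance (points : List Int) : Decidable (Pre_win_order points) := by unfold Pre_win_order; infer_instance
def pvWitness_win_order : List Int := [3, 1, 4, 1]

def Spec_win_order (points : List Int) (out : List Int) : Prop := out = win_order_alt points
instance (points : List Int) (out : List Int) : Decidable (Spec_win_order points out) := by unfold Spec_win_order; infer_instance

-- ===== CLAIM (what is proved, stated in full; the proofs are below) =====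
def Claim_equal_win_order : Prop := ∀ (points : List Int), Dom_win_order points → Pre_win_order points → Spec_win_order points (win_order points)

-- ===== LEMMAS AND PROOFS =====

-- bisect_left on a ≤-sorted list returns the number of elements strictly below x
lemma bisectLeft_eq_countP (xs : List Int) (x : Int)
    (h : xs.Pairwise (· ≤ ·)) :
    PySem.List.bisectLeft xs x = xs.countP (fun y => decide (y < x)) := by
  obtain ⟨hle, hlt, hge⟩ := PySem.List.bisectLeft_spec xs x h
  set k := PySem.List.bisectLeft xs x with hk
  have h1 : (xs.take k).countP (fun y => decide (y < x)) = (xs.take k).length := by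
    apply List.countP_eq_length.mpr
    intro y hy
    obtain ⟨j, hj, rfl⟩ := List.getElem_of_mem hy
    rw [List.length_take] at hj
    rw [List.getElem_take]
    exact decide_eq_true (hlt j (by omega) (by omega))
  have h2 : (xs.drop k).countP (fun y => decide (y < x)) = 0 := by
    apply List.countP_eq_zero.mpr
    intro y hy
    obtain ⟨j, hj, rfl⟩ := List.getElem_of_mem hy
    rw [List.length_drop] at hj
    rw [List.getElem_drop]
    have := hge (k + j) (by omega) (by omega)
    simp only [decide_eq_true_eq]
    omega
  have := List.take_append_drop k xs
  calc k = (xs.take k).countP (fun y => decide (y < x)) + (xs.drop k).countP (fun y => decide (y < x)) := by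
        rw [h1, h2, List.length_take]; omega
    _ = xs.countP (fun y => decide (y < x)) := by
        rw [← List.countP_append, List.take_append_drop]

-- B's rank for v over the four values: 1 + (number of values strictly below v)
lemma alt_entry (vals : List Int) (v : Int) :
    PySem.List.bisectLeft (PySem.List.sorted vals (fun x => x) false) v
      = vals.countP (fun y => decide (y < v)) := by
  rw [bisectLeft_eq_countP _ _ (PySem.List.sorted_pairwise vals (fun x => x))]
  exact (PySem.List.sorted_perm vals (fun x => x) false).countP_eq _

-- ===== VERDICT (by name: the statement is the Claim_ definition above) =====
theorem win_order_spec : Claim_equal_win_order := by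
  intro points _ hpre
  unfold Pre_win_order at hpre
  unfold Spec_win_order
  obtain ⟨a, b, c, d, rest, rfl⟩ : ∃ a b c d rest, points = a :: b :: c :: d :: rest := by
    rcases points with _ | ⟨a, _ | ⟨b, _ | ⟨c, _ | ⟨d, rest⟩⟩⟩⟩ <;>
      first
        | exact ⟨a, b, c, d, rest, rfl⟩
        | (exfalso; simp at hpre)
  have hr4 : PySem.List.pyRange 0 4 1 = [0, 1, 2, 3] := rfl
  simp only [win_order, win_order_alt, hr4, List.foldl_cons, List.foldl_nil,
    List.map_cons, List.map_nil, PySem.List.pyGetD_ofNat', List.getD_cons_zero,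
    List.getD_cons_succ, alt_entry, List.countP_cons, List.countP_nil,
    List.nil_append, List.cons_append, List.cons.injEq, and_true]
  refine ⟨?_, ?_, ?_, ?_⟩ <;> (simp only [decide_eq_true_eq]; split_ifs <;> push_cast <;> omega)
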